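-- pv_equiv track=rewrite | github.com/Quadram13/nu_choate_league | src/reports/bracket_generator.py | organize_bracket_by_round
-- ===== SOURCE A (Python) =====
-- from typing import Dict, List, Optional
--
-- def organize_bracket_by_round(bracket: List[Dict]) -> Dict[int, List[Dict]]:
--     """
--     Organize bracket matchups by round number.
--
--     Args:
--         bracket: List of matchup dictionaries
--
--     Returns:
--         Dictionary mapping round number to list of matchups
--     """
--     rounds = {}
--     matchup_map = {m.get('m'): m for m in bracket if m.get('m')}
--
--     for matchup in bracket:
--         round_num = matchup.get('r')
--         if round_num:
--             if round_num not in rounds: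
--                 rounds[round_num] = []
--             rounds[round_num].append(matchup)
--
--     # Sort matchups within each round by matchup ID
--     for round_num in rounds:
--         rounds[round_num].sort(key=lambda m: m.get('m', 0))
--
--     return rounds
-- ===== SOURCE B (Python) =====
-- def organize_bracket_by_round(bracket):
--     rounds = {}
--     # first pass: establish round keys in first-occurrence order
--     for m in bracket:
--         r = m.get('r')
--         if r and r not in rounds:
--             rounds[r] = []
--     # second pass: one global stable sort by matchup id, then distribute
--     for m in sorted(bracket, key=lambda m: m.get('m', 0)):
--         r = m.get('r')
--         if r:
--             rounds[r].append(m)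
--     return rounds
-- ===== Notes on version B (the rewrite author's own statement) =====
-- stated objective: alternative
-- what changed: A groups matchups round-by-round into a dict and then sorts each round's list separately; B first records the round keys in first-occurrence order, then performs one global stable sort of the whole bracket by matchup id and distributes it into the rounds, relying on stability of sorted() (A's unused matchup_map is dropped).
import Mathlib
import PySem

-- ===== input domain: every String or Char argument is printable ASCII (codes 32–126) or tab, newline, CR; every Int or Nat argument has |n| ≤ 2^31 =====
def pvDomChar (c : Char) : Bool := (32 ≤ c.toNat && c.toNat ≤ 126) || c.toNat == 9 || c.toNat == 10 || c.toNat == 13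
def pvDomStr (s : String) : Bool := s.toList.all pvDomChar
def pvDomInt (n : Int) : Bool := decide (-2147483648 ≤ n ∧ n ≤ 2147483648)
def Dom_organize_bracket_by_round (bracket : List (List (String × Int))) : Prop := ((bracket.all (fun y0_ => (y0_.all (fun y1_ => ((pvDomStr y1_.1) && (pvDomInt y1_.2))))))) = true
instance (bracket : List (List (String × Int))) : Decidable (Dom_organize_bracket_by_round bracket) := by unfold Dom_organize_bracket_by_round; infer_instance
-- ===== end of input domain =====

-- B replaces A's group-then-sort-each-round by one global stable sort followed by a distribute pass (and drops A's unused matchup_map): an alternative decomposition with the same result.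

-- ===== PORT A =====
-- A: build matchup_map (unused by the result), group matchups by truthy 'r' into an insertion-ordered dict, then sort each round's list by m.get('m', 0).
def organize_bracket_by_round (bracket : List (List (String × Int))) : List (Int × List (List (String × Int))) :=
  let matchup_map : PySem.Dict Int (List (String × Int)) :=
    bracket.foldl (fun d m =>
      match m.lookup "m" with
      | some v => if v ≠ 0 then d.insert v m else d
      | none => d) PySem.Dict.empty
  let rounds : PySem.Dict Int (List (List (String × Int))) :=
    bracket.foldl (fun d m =>
      match m.lookup "r" with
      | some r =>
        if r ≠ 0 then
          (if d.contains r then d else d.insert r ([] : List (List (String × Int)))).modify r [] (fun v => v ++ [m])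
        else d
      | none => d) PySem.Dict.empty
  let _ := matchup_map
  rounds.items.map (fun p => (p.1, PySem.List.sorted p.2 (fun m => (m.lookup "m").getD 0)))

-- ===== PORT B =====
-- B: first pass fixes round-key insertion order; second pass distributes the globally (stably) sorted bracket.
def organize_bracket_by_round_alt (bracket : List (List (String × Int))) : List (Int × List (List (String × Int))) :=
  let rounds0 : PySem.Dict Int (List (List (String × Int))) :=
    bracket.foldl (fun d m =>
      match m.lookup "r" with
      | some r => if r ≠ 0 ∧ d.contains r = false then d.insert r ([] : List (List (String × Int))) else d
      | none => d) PySem.Dict.empty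
  let rounds :=
    (PySem.List.sorted bracket (fun m => (m.lookup "m").getD 0)).foldl (fun d m =>
      match m.lookup "r" with
      | some r => if r ≠ 0 then d.modify r [] (fun v => v ++ [m]) else d
      | none => d) rounds0
  rounds.items

-- ===== PRECONDITION & SPEC =====
def Spec_organize_bracket_by_round (bracket : List (List (String × Int))) (out : List (Int × List (List (String × Int)))) : Prop := out = organize_bracket_by_round_alt bracket
instance (bracket : List (List (String × Int))) (out : List (Int × List (List (String × Int)))) : Decidable (Spec_organize_bracket_by_round bracket out) := by unfold Spec_organize_bracket_by_round; infer_instance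

-- ===== CLAIM (what is proved, stated in full; the proofs are below) =====
def Claim_equal_organize_bracket_by_round : Prop := ∀ (bracket : List (List (String × Int))), Dom_organize_bracket_by_round bracket → Spec_organize_bracket_by_round bracket (organize_bracket_by_round bracket)

-- ===== LEMMAS AND PROOFS =====

lemma pvInsertBy_all {α : Type} (b : α → α → Bool) (x : α) (l : List α)
    (h : ∀ z ∈ l, b x z = true) : PySem.List.insertBy b x l = x :: l := by
  cases l with
  | nil => rfl
  | cons z zs => simp [PySem.List.insertBy, h z (by simp)]

lemma pvFilter_insertBy {α : Type} (key : α → Int) (p : α → Bool) (x : α) (ys : List α)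
    (h : ys.Pairwise (fun a b => key a ≤ key b)) :
    (PySem.List.insertBy (fun a b => decide (key a < key b)) x ys).filter p
      = if p x then PySem.List.insertBy (fun a b => decide (key a < key b)) x (ys.filter p)
        else ys.filter p := by
  induction ys with
  | nil =>
    by_cases hp : p x = true <;> simp [PySem.List.insertBy, hp, List.filter]
  | cons y ys ih =>
    rw [List.pairwise_cons] at h
    obtain ⟨hy, hys⟩ := h
    by_cases hb : key x < key y
    · have hb' : (decide (key x < key y)) = true := by simpa using hb
      rw [PySem.List.insertBy]
      simp only [hb', if_true]
      by_cases hp : p x = true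
      · simp only [List.filter_cons, hp, if_true, hp]
        by_cases hpy : p y = true
        · simp [List.filter_cons, hpy, PySem.List.insertBy, hb']
        · simp only [List.filter_cons, hpy, if_neg, Bool.false_eq_true, not_false_iff, hp, if_true]
          rw [pvInsertBy_all]
          intro z hz
          have hz' := List.mem_filter.mp hz |>.1
          have := hy z hz'
          simp only [decide_eq_true_eq]
          omega
      · simp only [List.filter_cons, hp]
        simp [hp]
    · have hb' : (decide (key x < key y)) = false := by simpa using hb
      rw [PySem.List.insertBy]
      simp only [hb', Bool.false_eq_true, if_false]
      by_cases hpy : p y = true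
      · simp only [List.filter_cons, hpy, if_true]
        rw [ih hys]
        by_cases hp : p x = true
        · simp [hp, List.filter_cons, hpy, PySem.List.insertBy, hb']
        · simp [hp, List.filter_cons, hpy]
      · simp only [List.filter_cons, hpy, Bool.false_eq_true, if_false]
        rw [ih hys]

lemma pvFilter_sorted {α : Type} (xs : List α) (key : α → Int) (p : α → Bool) :
    (PySem.List.sorted xs key).filter p = PySem.List.sorted (xs.filter p) key := by
  induction xs using List.reverseRecOn with
  | nil => rfl
  | append_singleton xs x ih =>
    have hstep : ∀ (l : List α), PySem.List.sorted (l ++ [x]) key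
        = PySem.List.insertBy (fun a b => decide (key a < key b)) x (PySem.List.sorted l key) := by
      intro l
      simp [PySem.List.sorted_eq_foldl_insertBy, List.foldl_append]
    rw [hstep, pvFilter_insertBy key p x _ (PySem.List.sorted_pairwise xs key), ih]
    rw [List.filter_append]
    by_cases hp : p x = true
    · simp only [List.filter_cons, hp, if_true, List.filter_nil]
      rw [hstep]
    · simp [List.filter_cons, hp]

def pvRk (m : List (String × Int)) : Int := (m.lookup "r").getD 0
def pvTy (m : List (String × Int)) : Bool := pvRk m != 0

-- A's loop body: ensure-key-then-append is a single modify
lemma pvStepA_eq :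
    (fun (d : PySem.Dict Int (List (List (String × Int)))) (m : List (String × Int)) =>
      match m.lookup "r" with
      | some r =>
        if r ≠ 0 then
          (if d.contains r then d else d.insert r ([] : List (List (String × Int)))).modify r [] (fun v => v ++ [m])
        else d
      | none => d)
    = fun d m => if pvTy m then d.modify (pvRk m) [] (fun v => v ++ [m]) else d := by
  funext d m
  cases h : m.lookup "r" with
  | none => simp [pvTy, pvRk, h]
  | some r =>
    by_cases hr : r = 0
    · simp [pvTy, pvRk, h, hr]
    · have hty : pvTy m = true := by simp [pvTy, pvRk, h, hr]
      have hrk : pvRk m = r := by simp [pvRk, h]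
      simp only [hty, if_true, hr, ne_eq, not_false_iff, hrk]
      by_cases hc : d.contains r = true
      · simp [hc]
      · have hc' : d.contains r = false := by simpa using hc
        simp only [hc', Bool.false_eq_true, if_false, PySem.Dict.modify,
          PySem.Dict.insert_insert_self, PySem.Dict.getD_insert_self,
          PySem.Dict.getD_of_not_contains d _ hc']

-- B's first-pass body
lemma pvStepB1_eq :
    (fun (d : PySem.Dict Int (List (List (String × Int)))) (m : List (String × Int)) =>
      match m.lookup "r" with
      | some r => if r ≠ 0 ∧ d.contains r = false then d.insert r ([] : List (List (String × Int))) else d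
      | none => d)
    = fun d m => if pvTy m then (if d.contains (pvRk m) then d else d.insert (pvRk m) []) else d := by
  funext d m
  cases h : m.lookup "r" with
  | none => simp [pvTy, pvRk, h]
  | some r =>
    by_cases hr : r = 0
    · simp [pvTy, pvRk, h, hr]
    · have hty : pvTy m = true := by simp [pvTy, pvRk, h, hr]
      have hrk : pvRk m = r := by simp [pvRk, h]
      simp only [hty, if_true, hrk]
      by_cases hc : d.contains r = true
      · simp [hc, hr]
      · simp [hc, hr]

-- B's second-pass body
lemma pvStepB2_eq :
    (fun (d : PySem.Dict Int (List (List (String × Int)))) (m : List (String × Int)) =>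
      match m.lookup "r" with
      | some r => if r ≠ 0 then d.modify r [] (fun v => v ++ [m]) else d
      | none => d)
    = fun d m => if pvTy m then d.modify (pvRk m) [] (fun v => v ++ [m]) else d := by
  funext d m
  cases h : m.lookup "r" with
  | none => simp [pvTy, pvRk, h]
  | some r =>
    by_cases hr : r = 0
    · simp [pvTy, pvRk, h, hr]
    · have hty : pvTy m = true := by simp [pvTy, pvRk, h, hr]
      have hrk : pvRk m = r := by simp [pvRk, h]
      simp [hty, hrk, hr]

-- the grouping fold: lookups are the filtered sublists
lemma pvGroupFold_getD (l : List (List (String × Int)))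
    (d : PySem.Dict Int (List (List (String × Int)))) (r : Int) :
    (l.foldl (fun d m => d.modify (pvRk m) [] (fun v => v ++ [m])) d).getD r []
      = d.getD r [] ++ l.filter (fun m => pvRk m == r) := by
  have h := PySem.Dict.getD_foldl_modify_append (l.map (fun m => (pvRk m, m))) d r
  rw [List.foldl_map] at h
  simpa [List.filter_map, Function.comp_def, List.map_map] using h

-- the ensure-key fold: keys in first-occurrence order, all values []
lemma pvEnsure_keys (l : List (List (String × Int)))
    (d : PySem.Dict Int (List (List (String × Int)))) :
    (l.foldl (fun d m => if d.contains (pvRk m) then d else d.insert (pvRk m) []) d).keys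
      = PySem.Set.update d.keys (l.map pvRk) := by
  induction l generalizing d with
  | nil => simp [PySem.Set.update]
  | cons m l ih =>
    simp only [List.foldl_cons, List.map_cons, PySem.Set.update_cons]
    rw [ih]
    congr 1
    by_cases hc : d.contains (pvRk m) = true
    · rw [if_pos hc, PySem.Set.add_of_mem ((PySem.Dict.contains_iff_mem_keys d _).mp hc)]
    · have hc' : d.contains (pvRk m) = false := by simpa using hc
      rw [if_neg (by simp [hc]), PySem.Dict.keys_insert_of_not_contains d _ hc',
        PySem.Set.add_of_not_mem]
      intro hmem
      exact absurd ((PySem.Dict.contains_iff_mem_keys d _).mpr hmem) (by simp [hc])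

lemma pvEnsure_getD (l : List (List (String × Int)))
    (d : PySem.Dict Int (List (List (String × Int)))) (r : Int) :
    (l.foldl (fun d m => if d.contains (pvRk m) then d else d.insert (pvRk m) []) d).getD r []
      = d.getD r [] := by
  induction l generalizing d with
  | nil => rfl
  | cons m l ih =>
    simp only [List.foldl_cons]
    rw [ih]
    by_cases hc : d.contains (pvRk m) = true
    · rw [if_pos hc]
    · have hc' : d.contains (pvRk m) = false := by simpa using hc
      rw [if_neg (by simp [hc]), PySem.Dict.getD_insert]
      by_cases hr : r = pvRk m
      · rw [if_pos hr, hr, PySem.Dict.getD_of_not_contains d _ hc']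
      · rw [if_neg hr]

lemma pvMain_eq (bracket : List (List (String × Int))) :
    organize_bracket_by_round bracket = organize_bracket_by_round_alt bracket := by
  simp only [organize_bracket_by_round, organize_bracket_by_round_alt]
  rw [pvStepA_eq, pvStepB1_eq, pvStepB2_eq,
    PySem.List.foldl_if_eq_foldl_filter, PySem.List.foldl_if_eq_foldl_filter,
    PySem.List.foldl_if_eq_foldl_filter]
  set mk : List (String × Int) → Int := fun m => (m.lookup "m").getD 0 with hmk
  set tb := bracket.filter pvTy with htb
  set sb := (PySem.List.sorted bracket mk).filter pvTy with hsb
  set dA := tb.foldl (fun d m => d.modify (pvRk m) [] (fun v => v ++ [m])) PySem.Dict.empty with hdA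
  set dB0 := tb.foldl (fun d m => if d.contains (pvRk m) then d else d.insert (pvRk m) []) PySem.Dict.empty with hdB0
  set dB := sb.foldl (fun d m => d.modify (pvRk m) [] (fun v => v ++ [m])) dB0 with hdB
  have hKA : dA.keys = PySem.Set.ofList (tb.map pvRk) := by
    rw [hdA, PySem.Dict.keys_foldl_modify_key tb pvRk [] (fun _ m => fun v => v ++ [m])]
    simp [PySem.Set.update_nil_left]
  have hNA : dA.keys.Nodup := by
    rw [hdA]
    exact PySem.Dict.nodup_keys_foldl_modify_key tb pvRk [] (fun _ m => fun v => v ++ [m]) _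
      PySem.Dict.nodup_keys_empty
  have hgA : ∀ r, dA.getD r [] = tb.filter (fun m => pvRk m == r) := by
    intro r
    rw [hdA, pvGroupFold_getD]
    simp
  have hK0 : dB0.keys = PySem.Set.ofList (tb.map pvRk) := by
    rw [hdB0, pvEnsure_keys]
    simp [PySem.Set.update_nil_left]
  have hg0 : ∀ r, dB0.getD r [] = [] := by
    intro r
    rw [hdB0, pvEnsure_getD]
    simp
  have hKB : dB.keys = PySem.Set.ofList (tb.map pvRk) := by
    rw [hdB, PySem.Dict.keys_foldl_modify_key sb pvRk [] (fun _ m => fun v => v ++ [m]), hK0,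
      PySem.Set.update_eq_append_filter]
    have hnil : List.filter (fun y => !(PySem.Set.ofList (tb.map pvRk)).contains y)
        (PySem.Set.ofList (sb.map pvRk)) = [] := by
      rw [List.filter_eq_nil_iff]
      intro y hy
      have hy' : y ∈ sb.map pvRk := (PySem.Set.mem_ofList _ _).mp hy
      obtain ⟨m, hm, rfl⟩ := List.mem_map.mp hy'
      rw [hsb, List.mem_filter] at hm
      have hmb : m ∈ bracket := (PySem.List.mem_sorted bracket mk false m).mp hm.1
      have hmtb : m ∈ tb := by rw [htb]; exact List.mem_filter.mpr ⟨hmb, hm.2⟩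
      have hmem : pvRk m ∈ tb.map pvRk := List.mem_map.mpr ⟨m, hmtb, rfl⟩
      have hcont : (PySem.Set.ofList (tb.map pvRk)).contains (pvRk m) = true :=
        (PySem.Set.contains_iff _ _).mpr ((PySem.Set.mem_ofList _ _).mpr hmem)
      rw [hcont]
      simp
    rw [hnil, List.append_nil]
  have hNB : dB.keys.Nodup := by rw [hKB]; exact PySem.Set.nodup_ofList _
  have hgB : ∀ r, dB.getD r [] = sb.filter (fun m => pvRk m == r) := by
    intro r
    rw [hdB, pvGroupFold_getD, hg0]
    simp
  rw [PySem.Dict.items_eq_map_keys dA hNA [], PySem.Dict.items_eq_map_keys dB hNB [],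
    hKA, hKB, List.map_map]
  refine List.map_congr_left ?_
  intro r hr
  simp only [Function.comp]
  rw [hgA, hgB, htb, hsb, List.filter_filter, List.filter_filter, ← pvFilter_sorted]

-- ===== VERDICT (by name: the statement is the Claim_ definition above) =====
theorem organize_bracket_by_round_spec : Claim_equal_organize_bracket_by_round := by
  intro bracket _
  unfold Spec_organize_bracket_by_round
  exact pvMain_eq bracket
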